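-- pv_equiv track=rewrite | github.com/tenstorrent/tt-inference-server | workflows/release_report_markdown.py | _build_benchmark_check_columns
-- ===== SOURCE A (Python) =====
-- from typing import Any, Dict, List, Sequence, Tuple, Union
--
-- def _build_benchmark_check_columns(target_checks: Any) -> List[Tuple[str, str]]:
--     if not isinstance(target_checks, dict):
--         return []
--
--     check_columns = [
--         (
--             f"{target_name}_{metric}",
--             " ".join(
--                 word.upper() if word.lower() == "ttft" else word.capitalize()
--                 for word in f"{target_name}_{metric}".split("_")
--             )
--             + (
--                 ""
--                 if metric.endswith("_check") or metric.endswith("_ratio")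
--                 else " (ms)"
--                 if metric.startswith("ttft")
--                 else " (TPS)"
--                 if metric.startswith("tput")
--                 else ""
--             ),
--         )
--         for target_name in target_checks.keys()
--         for metric in ("ttft_check", "tput_user_check", "ttft", "tput_user")
--     ]
--     check_columns.sort(key=lambda column: not column[0].endswith("_check"))
--     return check_columns
-- ===== SOURCE B (Python) =====
-- from typing import Any, List, Tuple
--
--
-- def _pretty(name: str) -> str:
--     return " ".join(
--         word.upper() if word.lower() == "ttft" else word.capitalize()
--         for word in name.split("_")
--     )
--
--
-- def _build_benchmark_check_columns(target_checks: Any) -> List[Tuple[str, str]]: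
--     if not isinstance(target_checks, dict):
--         return []
--     checks: List[Tuple[str, str]] = []
--     others: List[Tuple[str, str]] = []
--     for target_name in target_checks.keys():
--         pretty = _pretty(target_name)
--         checks.append((f"{target_name}_ttft_check", f"{pretty} TTFT Check"))
--         checks.append((f"{target_name}_tput_user_check", f"{pretty} Tput User Check"))
--         others.append((f"{target_name}_ttft", f"{pretty} TTFT (ms)"))
--         others.append((f"{target_name}_tput_user", f"{pretty} Tput User (TPS)"))
--     return checks + others
-- ===== Notes on version B (the rewrite author's own statement) =====
-- stated objective: simpler
-- what changed: B drops the final stable sort and the per-metric split/join/suffix machinery: it walks the dict keys once, appending each key's two '_check' columns and two plain columns into separate lists with hard-coded metric labels (only the key prefix is prettified), and returns checks + others.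
import Mathlib
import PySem

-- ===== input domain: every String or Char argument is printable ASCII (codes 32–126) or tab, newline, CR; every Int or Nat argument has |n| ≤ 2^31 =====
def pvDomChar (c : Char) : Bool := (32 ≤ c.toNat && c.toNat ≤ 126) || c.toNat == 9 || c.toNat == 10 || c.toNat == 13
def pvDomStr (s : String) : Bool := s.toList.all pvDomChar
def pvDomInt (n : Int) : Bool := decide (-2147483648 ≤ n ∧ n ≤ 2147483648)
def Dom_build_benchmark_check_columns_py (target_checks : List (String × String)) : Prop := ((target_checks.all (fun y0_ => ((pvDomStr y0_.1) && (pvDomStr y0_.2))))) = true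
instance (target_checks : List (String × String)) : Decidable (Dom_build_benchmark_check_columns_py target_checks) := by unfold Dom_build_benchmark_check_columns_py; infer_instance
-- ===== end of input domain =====

-- B replaces A's collect-all-then-stable-sort (and its per-metric suffix chain) by a single pass that
-- appends each key's two '_check' columns and two plain columns into separate lists with fixed labels,
-- returning checks ++ others; objective: simpler.


-- ===== PORT A =====
-- word.capitalize(): first char upper-cased, rest lower-cased (hand port; exact on the ASCII domain,
-- where Python's title-case of the first character is its upper-case)
def pyCapitalize (cs : List Char) : List Char :=
  match cs with
  | [] => []
  | c :: rest => PySem.Chars.upperChar c :: PySem.Chars.lower rest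

-- word.upper() if word.lower() == "ttft" else word.capitalize()   (shared: both Pythons contain this expression)
def prettyWord (word : List Char) : List Char :=
  if PySem.Chars.lower word = "ttft".toList then PySem.Chars.upper word else pyCapitalize word

def build_benchmark_check_columns_py (target_checks : List (String × String)) : List (String × String) :=
  let check_columns :=
    (PySem.List.dedup (target_checks.map Prod.fst)).flatMap (fun target_name =>
      ["ttft_check", "tput_user_check", "ttft", "tput_user"].map (fun metric =>
        (String.ofList (target_name.toList ++ '_' :: metric.toList),  -- f"{target_name}_{metric}"
         String.ofList
           (PySem.Chars.join [' ']
              ((PySem.Chars.splitOn (target_name.toList ++ '_' :: metric.toList) ['_']).map prettyWord)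
            ++ (if PySem.Str.endswith metric "_check" || PySem.Str.endswith metric "_ratio" then []
                else if PySem.Str.startswith metric "ttft" then " (ms)".toList
                else if PySem.Str.startswith metric "tput" then " (TPS)".toList
                else [])))))
  PySem.List.sorted check_columns (fun column => !(PySem.Str.endswith column.1 "_check")) false

-- ===== PORT B =====
def pretty (name : String) : List Char :=
  PySem.Chars.join [' '] ((PySem.Chars.splitOn name.toList ['_']).map prettyWord)

def build_benchmark_check_columns_py_alt (target_checks : List (String × String)) : List (String × String) :=
  let r :=
    (PySem.List.dedup (target_checks.map Prod.fst)).foldl (fun acc target_name =>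
      (acc.1 ++ [(String.ofList (target_name.toList ++ "_ttft_check".toList), String.ofList (pretty target_name ++ " TTFT Check".toList)),
                 (String.ofList (target_name.toList ++ "_tput_user_check".toList), String.ofList (pretty target_name ++ " Tput User Check".toList))],
       acc.2 ++ [(String.ofList (target_name.toList ++ "_ttft".toList), String.ofList (pretty target_name ++ " TTFT (ms)".toList)),
                 (String.ofList (target_name.toList ++ "_tput_user".toList), String.ofList (pretty target_name ++ " Tput User (TPS)".toList))]))
      ([], [])
  r.1 ++ r.2

-- ===== PRECONDITION & SPEC =====
def Spec_build_benchmark_check_columns_py (target_checks : List (String × String)) (out : List (String × String)) : Prop := out = build_benchmark_check_columns_py_alt target_checks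
instance (target_checks : List (String × String)) (out : List (String × String)) : Decidable (Spec_build_benchmark_check_columns_py target_checks out) := by unfold Spec_build_benchmark_check_columns_py; infer_instance

-- ===== CLAIM (what is proved, stated in full; the proofs are below) =====
def Claim_equal_build_benchmark_check_columns_py : Prop := ∀ (target_checks : List (String × String)), Dom_build_benchmark_check_columns_py target_checks → Spec_build_benchmark_check_columns_py target_checks (build_benchmark_check_columns_py target_checks)

-- ===== LEMMAS AND PROOFS =====

-- inserting past a prefix the element never goes before
lemma insertBy_skip {α : Type} (before : α → α → Bool) (x : α) (F T : List α)
    (h : ∀ y ∈ F, before x y = false) :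
    PySem.List.insertBy before x (F ++ T) = F ++ PySem.List.insertBy before x T := by
  induction F with
  | nil => simp
  | cons f fs ih =>
    have hf : before x f = false := h f (by simp)
    simp only [List.cons_append, PySem.List.insertBy, hf]
    simp only [Bool.false_eq_true, if_false, List.cons.injEq, true_and]
    exact ih (fun y hy => h y (by simp [hy]))

-- stable sort by a Bool key is the false-block then the true-block, each in input order
lemma foldl_insertBy_bool {α : Type} (key : α → Bool) :
    ∀ (xs F T : List α), (∀ a ∈ F, key a = false) → (∀ a ∈ T, key a = true) →
    xs.foldl (fun acc x => PySem.List.insertBy (fun a b => decide (key a < key b)) x acc) (F ++ T)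
      = (F ++ xs.filter (fun x => !key x)) ++ (T ++ xs.filter (fun x => key x)) := by
  intro xs
  induction xs with
  | nil => intro F T _ _; simp
  | cons x xs ih =>
    intro F T hF hT
    by_cases hx : key x = true
    · have hstep : PySem.List.insertBy (fun a b => decide (key a < key b)) x (F ++ T) = (F ++ T) ++ [x] := by
        apply PySem.List.insertBy_of_forall_not_before
        intro y _
        simp [hx]
      simp only [List.foldl_cons, hstep]
      rw [List.append_assoc F T [x],
          ih F (T ++ [x]) hF (by
            intro a ha
            rcases List.mem_append.mp ha with h | h
            · exact hT a h
            · rw [List.mem_singleton.mp h]; exact hx)]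
      simp [hx]
    · have hx' : key x = false := by simpa using hx
      have hstep : PySem.List.insertBy (fun a b => decide (key a < key b)) x (F ++ T) = (F ++ [x]) ++ T := by
        rw [insertBy_skip _ _ F T (fun y hy => by simp [hx', hF y hy])]
        cases T with
        | nil => simp [PySem.List.insertBy]
        | cons t ts => simp [PySem.List.insertBy, hx', hT t (by simp)]
      simp only [List.foldl_cons, hstep]
      rw [ih (F ++ [x]) T (by
            intro a ha
            rcases List.mem_append.mp ha with h | h
            · exact hF a h
            · rw [List.mem_singleton.mp h]; exact hx') hT]
      simp [hx']

lemma sorted_bool_key {α : Type} (key : α → Bool) (xs : List α) :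
    PySem.List.sorted xs key false = xs.filter (fun x => !key x) ++ xs.filter (fun x => key x) := by
  rw [PySem.List.sorted_eq_foldl_insertBy]
  simpa using foldl_insertBy_bool key xs [] [] (by simp) (by simp)

lemma modifyHead_fun_id {α : Type} (l : List α) : l.modifyHead (fun x => x) = l := by
  cases l <;> simp

-- PySem's fuelled splitter on a one-char separator is List.splitOnP
lemma splitOn_go_char :
    ∀ (fuel : Nat) (l cur : List Char) (acc : List (List Char)), l.length ≤ fuel →
      PySem.Chars.splitOn.go ['_'] fuel l cur acc
        = acc.reverse ++ (List.splitOnP (· == '_') l).modifyHead (cur.reverse ++ ·) := by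
  intro fuel
  induction fuel with
  | zero =>
    intro l cur acc hl
    have : l = [] := by cases l <;> simp_all
    subst this
    simp [PySem.Chars.splitOn.go, List.splitOnP_nil]
  | succ fuel ih =>
    intro l cur acc hl
    cases l with
    | nil => simp [PySem.Chars.splitOn.go, List.splitOnP_nil]
    | cons c rest =>
      by_cases hc : c = '_'
      · subst hc
        have hpre : List.isPrefixOf ['_'] ('_' :: rest) = true := by simp [List.isPrefixOf]
        simp only [PySem.Chars.splitOn.go, hpre, if_true, List.length, List.drop]
        rw [ih rest [] (List.reverse cur :: acc) (by simpa using Nat.lt_succ_iff.mp (by simpa using hl))]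
        simp [List.splitOnP_cons, modifyHead_fun_id]
      · have hpre : List.isPrefixOf ['_'] (c :: rest) = true → False := by
          simp [List.isPrefixOf]
          intro h
          exact hc h.symm
        simp only [PySem.Chars.splitOn.go]
        rw [if_neg (by simpa using hpre)]
        rw [ih rest (c :: cur) acc (by simpa using Nat.lt_succ_iff.mp (by simpa using hl))]
        have hc' : (c == '_') = false := by simpa using hc
        simp only [List.splitOnP_cons, hc', Bool.false_eq_true, if_false, List.modifyHead_modifyHead]
        congr 1
        cases h : List.splitOnP (· == '_') rest with
        | nil => exact absurd h (List.splitOnP_ne_nil _ _)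
        | cons a as => simp

lemma splitOn_underscore (cs : List Char) :
    PySem.Chars.splitOn cs ['_'] = List.splitOnP (· == '_') cs := by
  unfold PySem.Chars.splitOn
  rw [splitOn_go_char (cs.length + 1) cs [] [] (by omega)]
  simp [modifyHead_fun_id]

lemma modifyHead_append {α : Type} (f : α → α) (xs ys : List α) (h : xs ≠ []) :
    (xs ++ ys).modifyHead f = xs.modifyHead f ++ ys := by
  cases xs with
  | nil => exact absurd rfl h
  | cons a as => simp

lemma splitOnP_underscore_append (a b : List Char) :
    List.splitOnP (· == '_') (a ++ '_' :: b)
      = List.splitOnP (· == '_') a ++ List.splitOnP (· == '_') b := by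
  induction a with
  | nil => simp [List.splitOnP_cons, List.splitOnP_nil]
  | cons c cs ih =>
    by_cases hc : (c == '_') = true
    · simp [List.splitOnP_cons, hc, ih]
    · simp only [List.cons_append, List.splitOnP_cons, hc, Bool.false_eq_true, if_false, ih]
      rw [modifyHead_append _ _ _ (List.splitOnP_ne_nil _ _)]

lemma join_append (sep : List Char) (xs ys : List (List Char)) (hx : xs ≠ []) (hy : ys ≠ []) :
    PySem.Chars.join sep (xs ++ ys) = PySem.Chars.join sep xs ++ sep ++ PySem.Chars.join sep ys := by
  induction xs with
  | nil => exact absurd rfl hx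
  | cons p ps ih =>
    cases ps with
    | nil =>
      cases ys with
      | nil => exact absurd rfl hy
      | cons y ys' => simp [PySem.Chars.join_cons_cons, PySem.Chars.join_singleton]
    | cons q qs =>
      have ih' := ih (by simp)
      simp only [List.cons_append] at ih' ⊢
      rw [PySem.Chars.join_cons_cons, ih', PySem.Chars.join_cons_cons]
      simp [List.append_assoc]

-- the label of f"{t}_{m}" splits into the label of t, a space, and the label of m
lemma pretty_append (t m : List Char) :
    PySem.Chars.join [' '] ((PySem.Chars.splitOn (t ++ '_' :: m) ['_']).map prettyWord)
      = PySem.Chars.join [' '] ((PySem.Chars.splitOn t ['_']).map prettyWord)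
        ++ ' ' :: PySem.Chars.join [' '] ((PySem.Chars.splitOn m ['_']).map prettyWord) := by
  rw [splitOn_underscore, splitOn_underscore, splitOn_underscore, splitOnP_underscore_append,
      List.map_append,
      join_append [' '] _ _ (by simp [List.splitOnP_ne_nil]) (by simp [List.splitOnP_ne_nil])]
  simp

-- A's full label equals B's: pretty(t) followed by the metric's fixed text
lemma label_concat (t : String) (m suffix out : List Char)
    (h : ' ' :: (PySem.Chars.join [' '] ((PySem.Chars.splitOn m ['_']).map prettyWord) ++ suffix) = out) :
    PySem.Chars.join [' '] ((PySem.Chars.splitOn (t.toList ++ '_' :: m) ['_']).map prettyWord) ++ suffix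
      = pretty t ++ out := by
  rw [pretty_append]
  simp [pretty, ← h]

-- a list ending in `t` does not end in `s` when their last characters differ
lemma endswith_append_false (l s t : List Char) (hs : s ≠ []) (ht : t ≠ [])
    (h : s.getLast? ≠ t.getLast?) : PySem.Chars.endswith (l ++ t) s = false := by
  rw [Bool.eq_false_iff]
  intro hcon
  obtain ⟨p, hp⟩ := (PySem.Chars.endswith_iff _ _).mp hcon
  have h1 : (p ++ s).getLast? = s.getLast? := List.getLast?_append_of_ne_nil _ hs
  have h2 : (l ++ t).getLast? = t.getLast? := List.getLast?_append_of_ne_nil _ ht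
  exact h (by rw [← h1, hp, h2])

lemma endswith_check_append (l suffix : List Char) (h : "_check".toList <:+ suffix) :
    PySem.Chars.endswith (l ++ suffix) "_check".toList = true := by
  rw [PySem.Chars.endswith_iff]
  exact List.IsSuffix.trans h (List.suffix_append _ _)

lemma foldl_pair_append {β σ : Type} (g1 g2 : β → List σ) (l : List β) (a b : List σ) :
    l.foldl (fun acc x => (acc.1 ++ g1 x, acc.2 ++ g2 x)) (a, b)
      = (a ++ l.flatMap g1, b ++ l.flatMap g2) := by
  induction l generalizing a b with
  | nil => simp
  | cons x xs ih => simp [ih]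

-- ===== VERDICT (by name: the statement is the Claim_ definition above) =====
theorem build_benchmark_check_columns_py_spec : Claim_equal_build_benchmark_check_columns_py := by
  intro target_checks _
  unfold Spec_build_benchmark_check_columns_py
  simp only [build_benchmark_check_columns_py, build_benchmark_check_columns_py_alt]
  rw [foldl_pair_append]
  rw [sorted_bool_key]
  simp only [List.nil_append]
  generalize PySem.List.dedup (target_checks.map Prod.fst) = ts
  congr 1
  · induction ts with
    | nil => simp
    | cons t ts ih =>
      simp only [List.flatMap_cons, List.filter_append, ih]
      congr 1
      have hk1 : PySem.Str.endswith (String.ofList (t.toList ++ '_' :: "ttft_check".toList)) "_check" = true := by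
        rw [PySem.Str.endswith_eq, String.toList_ofList]
        exact endswith_check_append _ _ (by decide)
      have hk2 : PySem.Str.endswith (String.ofList (t.toList ++ '_' :: "tput_user_check".toList)) "_check" = true := by
        rw [PySem.Str.endswith_eq, String.toList_ofList]
        exact endswith_check_append _ _ (by decide)
      have hk3 : PySem.Str.endswith (String.ofList (t.toList ++ '_' :: "ttft".toList)) "_check" = false := by
        rw [PySem.Str.endswith_eq, String.toList_ofList]
        exact endswith_append_false _ _ _ (by decide) (by decide) (by decide)
      have hk4 : PySem.Str.endswith (String.ofList (t.toList ++ '_' :: "tput_user".toList)) "_check" = false := by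
        rw [PySem.Str.endswith_eq, String.toList_ofList]
        exact endswith_append_false _ _ _ (by decide) (by decide) (by decide)
      simp only [List.map_cons, List.map_nil, List.filter_cons, List.filter_nil, hk1, hk2, hk3, hk4]
      simp only [Bool.not_false, Bool.not_true, Bool.false_eq_true, if_true, if_neg, not_false_iff]
      simp only [(by decide : (PySem.Str.endswith "ttft_check" "_check" || PySem.Str.endswith "ttft_check" "_ratio") = true),
                 (by decide : (PySem.Str.endswith "tput_user_check" "_check" || PySem.Str.endswith "tput_user_check" "_ratio") = true),
                 if_true]
      rw [label_concat t "ttft_check".toList [] " TTFT Check".toList (by decide),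
          label_concat t "tput_user_check".toList [] " Tput User Check".toList (by decide),
          (by decide : '_' :: "ttft_check".toList = "_ttft_check".toList),
          (by decide : '_' :: "tput_user_check".toList = "_tput_user_check".toList)]
  · induction ts with
    | nil => simp
    | cons t ts ih =>
      simp only [List.flatMap_cons, List.filter_append, ih]
      congr 1
      have hk1 : PySem.Str.endswith (String.ofList (t.toList ++ '_' :: "ttft_check".toList)) "_check" = true := by
        rw [PySem.Str.endswith_eq, String.toList_ofList]
        exact endswith_check_append _ _ (by decide)
      have hk2 : PySem.Str.endswith (String.ofList (t.toList ++ '_' :: "tput_user_check".toList)) "_check" = true := by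
        rw [PySem.Str.endswith_eq, String.toList_ofList]
        exact endswith_check_append _ _ (by decide)
      have hk3 : PySem.Str.endswith (String.ofList (t.toList ++ '_' :: "ttft".toList)) "_check" = false := by
        rw [PySem.Str.endswith_eq, String.toList_ofList]
        exact endswith_append_false _ _ _ (by decide) (by decide) (by decide)
      have hk4 : PySem.Str.endswith (String.ofList (t.toList ++ '_' :: "tput_user".toList)) "_check" = false := by
        rw [PySem.Str.endswith_eq, String.toList_ofList]
        exact endswith_append_false _ _ _ (by decide) (by decide) (by decide)
      simp only [List.map_cons, List.map_nil, List.filter_cons, List.filter_nil, hk1, hk2, hk3, hk4]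
      simp only [Bool.not_false, Bool.not_true, Bool.false_eq_true, if_true, if_neg, not_false_iff]
      simp only [(by decide : (PySem.Str.endswith "ttft" "_check" || PySem.Str.endswith "ttft" "_ratio") = false),
                 (by decide : (PySem.Str.endswith "tput_user" "_check" || PySem.Str.endswith "tput_user" "_ratio") = false),
                 (by decide : PySem.Str.startswith "ttft" "ttft" = true),
                 (by decide : PySem.Str.startswith "tput_user" "ttft" = false),
                 (by decide : PySem.Str.startswith "tput_user" "tput" = true),
                 Bool.false_eq_true, if_true, if_neg, not_false_iff]
      rw [label_concat t "ttft".toList " (ms)".toList " TTFT (ms)".toList (by decide),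
          label_concat t "tput_user".toList " (TPS)".toList " Tput User (TPS)".toList (by decide),
          (by decide : '_' :: "ttft".toList = "_ttft".toList),
          (by decide : '_' :: "tput_user".toList = "_tput_user".toList)]
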